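-- pv_equiv track=rewrite | github.com/guige2023/rabai_autoclick | actions/text_similarity_action.py | _stem_word
-- ===== SOURCE A (Python) =====
-- def _stem_word(word: str) -> str:
--     """Simple Porter-like suffix stripping."""
--     suffixes = ["ational", "tional", "enci", "anci", "izer", "ising", "izing",
--                 "ational", "fulness", "ousness", "alism", "ation", "ator",
--                 "alism", "iveness", "fulness", "ousness", "aliti", "iviti",
--                 "biliti", "ies", "ment", "ness", "ance", "ence", "able", "ible",
--                 "ant", "ent", "ism", "ate", "iti", "ous", "ive", "ize", "ies",
--                 "ing", "ful", "est", "ion", "ous", "ive", "ble", "ter", "per", "led"]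
--     word = word.lower()
--     for suffix in sorted(suffixes, key=len, reverse=True):
--         if word.endswith(suffix) and len(word) > len(suffix) + 2:
--             return word[: -len(suffix)]
--     return word
-- ===== SOURCE B (Python) =====
-- def _stem_word(word: str) -> str:
--     """Simple Porter-like suffix stripping."""
--     suffixes = ["ational", "tional", "enci", "anci", "izer", "ising", "izing",
--                 "ational", "fulness", "ousness", "alism", "ation", "ator",
--                 "alism", "iveness", "fulness", "ousness", "aliti", "iviti",
--                 "biliti", "ies", "ment", "ness", "ance", "ence", "able", "ible",
--                 "ant", "ent", "ism", "ate", "iti", "ous", "ive", "ize", "ies",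
--                 "ing", "ful", "est", "ion", "ous", "ive", "ble", "ter", "per", "led"]
--     word = word.lower()
--     best = 0  # length of the longest suffix that strips; the result depends only on it
--     for suffix in suffixes:
--         if len(suffix) > best and word.endswith(suffix) and len(word) > len(suffix) + 2:
--             best = len(suffix)
--     return word[:-best] if best else word
-- ===== Notes on version B (the rewrite author's own statement) =====
-- stated objective: simpler
-- what changed: Replaces the per-call sort of the suffix list and the ordered scan with early return by a single unsorted pass that keeps only the length of the longest applicable suffix (the result depends only on that length), then slices once.
import Mathlib
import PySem

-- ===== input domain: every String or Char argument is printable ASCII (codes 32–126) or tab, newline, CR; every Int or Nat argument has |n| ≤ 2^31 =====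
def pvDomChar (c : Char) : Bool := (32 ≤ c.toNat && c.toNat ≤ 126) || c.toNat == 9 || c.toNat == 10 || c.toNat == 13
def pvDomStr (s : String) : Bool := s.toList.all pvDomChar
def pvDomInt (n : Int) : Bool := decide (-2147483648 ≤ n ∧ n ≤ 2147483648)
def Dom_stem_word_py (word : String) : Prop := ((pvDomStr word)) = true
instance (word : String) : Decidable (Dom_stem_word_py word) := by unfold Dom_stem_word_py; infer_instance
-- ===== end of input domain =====

-- B drops A's per-call sort-and-scan: one unsorted pass keeps the length of the longest
-- applicable suffix (the returned value depends only on that length), then slices once. (objective: simpler)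

-- ===== PORT A =====
def pvSuffixes : List String :=
  ["ational", "tional", "enci", "anci", "izer", "ising", "izing",
   "ational", "fulness", "ousness", "alism", "ation", "ator",
   "alism", "iveness", "fulness", "ousness", "aliti", "iviti",
   "biliti", "ies", "ment", "ness", "ance", "ence", "able", "ible",
   "ant", "ent", "ism", "ate", "iti", "ous", "ive", "ize", "ies",
   "ing", "ful", "est", "ion", "ous", "ive", "ble", "ter", "per", "led"]

-- A's for-loop with early return, over the sorted suffix list
def pvStemLoop (w : String) : List String → String
  | [] => w
  | s :: rest =>
    if PySem.Str.endswith w s ∧ PySem.Str.len w > PySem.Str.len s + 2 then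
      PySem.Str.slice w none (some (-(PySem.Str.len s)))
    else pvStemLoop w rest

def stem_word_py (word : String) : String :=
  let w := PySem.Str.lower word
  pvStemLoop w (PySem.List.sorted pvSuffixes (fun s => PySem.Str.len s) true)

-- ===== PORT B =====
def stem_word_py_alt (word : String) : String :=
  let w := PySem.Str.lower word
  let best := pvSuffixes.foldl
    (fun b s =>
      if PySem.Str.len s > b ∧ PySem.Str.endswith w s ∧ PySem.Str.len w > PySem.Str.len s + 2 then
        PySem.Str.len s
      else b) 0
  if best ≠ 0 then PySem.Str.slice w none (some (-best)) else w

-- ===== PRECONDITION & SPEC =====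
def Spec_stem_word_py (word : String) (out : String) : Prop := out = stem_word_py_alt word
instance (word : String) (out : String) : Decidable (Spec_stem_word_py word out) := by unfold Spec_stem_word_py; infer_instance

-- ===== CLAIM (what is proved, stated in full; the proofs are below) =====
def Claim_equal_stem_word_py : Prop := ∀ (word : String), Dom_stem_word_py word → Spec_stem_word_py word (stem_word_py word)

-- ===== LEMMAS AND PROOFS =====

-- the stripped length contributed by one suffix (0 if it does not apply)
def pvG (w s : String) : Int :=
  if PySem.Str.endswith w s ∧ PySem.Str.len w > PySem.Str.len s + 2 then PySem.Str.len s else 0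

-- max applicable suffix length over a list
def pvMx (w : String) (L : List String) : Int :=
  L.foldr (fun s b => max (pvG w s) b) 0

theorem pvMx_nonneg (w : String) (L : List String) : 0 ≤ pvMx w L := by
  induction L with
  | nil => simp [pvMx]
  | cons s rest ih => simp only [pvMx, List.foldr] at *; exact le_max_of_le_right ih

theorem pvMx_le (w : String) (L : List String) (c : Int)
    (hc : 0 ≤ c) (h : ∀ s ∈ L, pvG w s ≤ c) : pvMx w L ≤ c := by
  induction L with
  | nil => simpa [pvMx]
  | cons s rest ih =>
      simp only [pvMx, List.foldr] at *
      exact max_le (h s (by simp)) (ih (fun t ht => h t (by simp [ht])))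

theorem pvG_le_len (w s : String) (h : 0 < PySem.Str.len s) : pvG w s ≤ PySem.Str.len s := by
  unfold pvG; split <;> omega

-- A's ordered scan over a length-descending list returns exactly the max applicable length
theorem pvStemLoop_eq (w : String) (L : List String)
    (hpw : L.Pairwise (fun a b => PySem.Str.len b ≤ PySem.Str.len a))
    (hpos : ∀ s ∈ L, 0 < PySem.Str.len s) :
    pvStemLoop w L =
      if pvMx w L = 0 then w else PySem.Str.slice w none (some (-(pvMx w L))) := by
  induction L with
  | nil => simp [pvStemLoop, pvMx]
  | cons s rest ih =>
      rcases List.pairwise_cons.mp hpw with ⟨hall, hrest⟩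
      have hs : 0 < PySem.Str.len s := hpos s (by simp)
      have hMxRest : pvMx w rest ≤ PySem.Str.len s := by
        apply pvMx_le _ _ _ (le_of_lt hs)
        intro t ht
        exact le_trans (pvG_le_len w t (hpos t (by simp [ht]))) (hall t ht)
      have hcons : pvMx w (s :: rest) = max (pvG w s) (pvMx w rest) := rfl
      by_cases hp : PySem.Str.endswith w s = true ∧ PySem.Str.len w > PySem.Str.len s + 2
      · have hg : pvG w s = PySem.Str.len s := by unfold pvG; rw [if_pos hp]
        have hmx : pvMx w (s :: rest) = PySem.Str.len s := by
          rw [hcons, hg]; exact max_eq_left hMxRest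
        rw [hmx]
        simp only [pvStemLoop]
        rw [if_pos hp, if_neg (show ¬ PySem.Str.len s = 0 by omega)]
      · have hg : pvG w s = 0 := by unfold pvG; rw [if_neg hp]
        have hmx : pvMx w (s :: rest) = pvMx w rest := by
          rw [hcons, hg]; exact max_eq_right (pvMx_nonneg w rest)
        rw [hmx]
        simp only [pvStemLoop]
        rw [if_neg hp]
        exact ih hrest (fun t ht => hpos t (List.mem_cons_of_mem _ ht))

-- B's one-pass running maximum computes the same max
theorem pvFold_eq (w : String) (L : List String) (b : Int) (hb : 0 ≤ b) :
    L.foldl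
      (fun b s =>
        if PySem.Str.len s > b ∧ PySem.Str.endswith w s ∧ PySem.Str.len w > PySem.Str.len s + 2 then
          PySem.Str.len s
        else b) b = max b (pvMx w L) := by
  induction L generalizing b with
  | nil => simp [pvMx, max_eq_left hb]
  | cons s rest ih =>
      have hstep :
          (if PySem.Str.len s > b ∧ PySem.Str.endswith w s ∧ PySem.Str.len w > PySem.Str.len s + 2 then
            PySem.Str.len s
          else b) = max b (pvG w s) := by
        by_cases hq : PySem.Str.endswith w s = true ∧ PySem.Str.len w > PySem.Str.len s + 2
        · have hg : pvG w s = PySem.Str.len s := by unfold pvG; rw [if_pos hq]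
          rw [hg]
          by_cases hlt : PySem.Str.len s > b
          · rw [if_pos ⟨hlt, hq.1, hq.2⟩, max_eq_right (le_of_lt hlt)]
          · rw [if_neg (fun hc => hlt hc.1), max_eq_left (by omega)]
        · have hg : pvG w s = 0 := by unfold pvG; rw [if_neg hq]
          rw [hg, max_eq_left hb, if_neg (fun hc => hq ⟨hc.2.1, hc.2.2⟩)]
      have hcons : pvMx w (s :: rest) = max (pvG w s) (pvMx w rest) := rfl
      simp only [List.foldl, hstep]
      rw [ih (max b (pvG w s)) (le_max_of_le_left hb), hcons, max_assoc]

-- pvMx is invariant under permutation (max is commutative and associative)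
theorem pvMx_perm (w : String) {L₁ L₂ : List String} (h : L₁.Perm L₂) :
    pvMx w L₁ = pvMx w L₂ := by
  induction h with
  | nil => rfl
  | cons x _ ih =>
      unfold pvMx at ih ⊢
      simp only [List.foldr_cons]
      rw [ih]
  | swap x y l =>
      unfold pvMx
      simp only [List.foldr_cons]
      exact max_left_comm _ _ _
  | trans _ _ ih₁ ih₂ => rw [ih₁, ih₂]

theorem pvSuffixes_pos : ∀ s ∈ pvSuffixes, 0 < PySem.Str.len s := by decide

-- ===== VERDICT (by name: the statement is the Claim_ definition above) =====
theorem stem_word_py_spec : Claim_equal_stem_word_py := by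
  unfold Claim_equal_stem_word_py
  intro word _
  unfold Spec_stem_word_py
  have hA : stem_word_py word =
      pvStemLoop (PySem.Str.lower word)
        (PySem.List.sorted pvSuffixes (fun s => PySem.Str.len s) true) := rfl
  have hB : stem_word_py_alt word =
      (if (pvSuffixes.foldl
            (fun b s =>
              if PySem.Str.len s > b ∧ PySem.Str.endswith (PySem.Str.lower word) s ∧
                  PySem.Str.len (PySem.Str.lower word) > PySem.Str.len s + 2 then
                PySem.Str.len s
              else b) 0) ≠ 0 then
        PySem.Str.slice (PySem.Str.lower word) none
          (some (-(pvSuffixes.foldl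
            (fun b s =>
              if PySem.Str.len s > b ∧ PySem.Str.endswith (PySem.Str.lower word) s ∧
                  PySem.Str.len (PySem.Str.lower word) > PySem.Str.len s + 2 then
                PySem.Str.len s
              else b) 0)))
      else PySem.Str.lower word) := rfl
  set w := PySem.Str.lower word with hw
  set S := PySem.List.sorted pvSuffixes (fun s => PySem.Str.len s) true with hS
  have hperm : S.Perm pvSuffixes := PySem.List.sorted_perm _ _ _
  have hpw : S.Pairwise (fun a b => PySem.Str.len b ≤ PySem.Str.len a) :=
    PySem.List.sorted_pairwise_rev _ _
  have hpos : ∀ s ∈ S, 0 < PySem.Str.len s := fun s hs =>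
    pvSuffixes_pos s (hperm.mem_iff.mp hs)
  rw [hA, hB, pvFold_eq w pvSuffixes 0 le_rfl, max_eq_right (pvMx_nonneg w pvSuffixes),
      pvStemLoop_eq w S hpw hpos, pvMx_perm w hperm]
  by_cases h0 : pvMx w pvSuffixes = 0 <;> simp [h0]
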